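-- pv_equiv track=rewrite | github.com/Berkayilmz/Deal-Eye | backend/market-fiyat-org/predict.py | fill_zeros_with_next
-- ===== SOURCE A (Python) =====
-- def fill_zeros_with_next(prices):
--     for i in range(len(prices)):
--         if prices[i] == 0:
--             for j in range(i + 1, len(prices)):
--                 if prices[j] != 0:
--                     prices[i] = prices[j]
--                     break
--     return prices
-- ===== SOURCE B (Python) =====
-- def fill_zeros_with_next(prices):
--     carry = 0
--     out = []
--     for x in reversed(prices):
--         if x != 0:
--             carry = x
--         out.append(carry if x == 0 else x)
--     out.reverse()
--     prices[:] = out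
--     return prices
-- ===== Notes on version B (the rewrite author's own statement) =====
-- stated objective: alternative
-- what changed: Replaced the nested rescan (for each zero, scan right for the next non-zero) by a single right-to-left pass that carries the most recent non-zero value.
import Mathlib
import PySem

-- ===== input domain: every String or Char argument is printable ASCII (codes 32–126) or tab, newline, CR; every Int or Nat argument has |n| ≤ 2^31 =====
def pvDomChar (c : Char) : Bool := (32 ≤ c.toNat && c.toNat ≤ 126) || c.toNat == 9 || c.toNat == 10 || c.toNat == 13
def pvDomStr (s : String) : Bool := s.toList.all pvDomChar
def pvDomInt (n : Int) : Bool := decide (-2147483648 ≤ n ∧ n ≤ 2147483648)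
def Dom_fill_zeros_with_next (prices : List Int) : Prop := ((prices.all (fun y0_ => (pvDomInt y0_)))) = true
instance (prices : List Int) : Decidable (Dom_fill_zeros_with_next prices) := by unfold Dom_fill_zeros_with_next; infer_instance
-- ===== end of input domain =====

-- B replaces A's nested rescan by one right-to-left pass carrying the last non-zero value
-- (alternative algorithm). Both Pythons mutate `prices` in place identically; the theorems are
-- about the return value.

-- ===== PORT A =====
-- inner loop: `for j in range(i+1, len(prices)): if prices[j] != 0: prices[i] = prices[j]; break`
def fzInnerA (ps : List Int) (i : Int) : List Int → List Int
  | [] => ps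
  | j :: js =>
    if PySem.List.pyGetD ps j 0 ≠ 0 then PySem.List.pySetD ps i (PySem.List.pyGetD ps j 0)
    else fzInnerA ps i js

-- outer loop: `for i in range(len(prices)): if prices[i] == 0: <inner loop>`
def fzOuterA (ps : List Int) : List Int → List Int
  | [] => ps
  | i :: is =>
    if PySem.List.pyGetD ps i 0 = 0 then
      fzOuterA (fzInnerA ps i (PySem.List.pyRange (i + 1) ps.length 1)) is
    else fzOuterA ps is

def fill_zeros_with_next (prices : List Int) : List Int :=
  fzOuterA prices (PySem.List.pyRange 0 prices.length 1)

-- ===== PORT B =====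
-- one pass over `reversed(prices)` carrying the last non-zero value, appending, then reversing
def fill_zeros_with_next_alt (prices : List Int) : List Int :=
  ((prices.reverse.foldl
    (fun (st : Int × List Int) x =>
      let carry := if x ≠ 0 then x else st.1
      (carry, st.2 ++ [if x = 0 then carry else x]))
    (0, [])).2).reverse

-- ===== PRECONDITION & SPEC =====
def Spec_fill_zeros_with_next (prices : List Int) (out : List Int) : Prop := out = fill_zeros_with_next_alt prices
instance (prices : List Int) (out : List Int) : Decidable (Spec_fill_zeros_with_next prices out) := by unfold Spec_fill_zeros_with_next; infer_instance

-- ===== CLAIM (what is proved, stated in full; the proofs are below) =====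
def Claim_equal_fill_zeros_with_next : Prop := ∀ (prices : List Int), Dom_fill_zeros_with_next prices → Spec_fill_zeros_with_next prices (fill_zeros_with_next prices)

-- ===== LEMMAS AND PROOFS =====

-- common characterisation: each zero becomes the first non-zero to its right (default c)
def fzFirst (c : Int) (xs : List Int) : Int := (xs.find? (fun x => x != 0)).getD c

def fzFill (c : Int) : List Int → List Int
  | [] => []
  | x :: t => (if x = 0 then fzFirst c t else x) :: fzFill c t

lemma fzInnerA_spec (ps : List Int) (k : Nat) (hk : k < ps.length) :
    ∀ (n m : Nat), ps.length - m = n →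
      fzInnerA ps (k : Int) (PySem.List.pyRange (m : Int) ps.length 1) =
        match (ps.drop m).find? (fun x => x != 0) with
        | some v => ps.set k v
        | none => ps := by
  intro n
  induction n with
  | zero =>
    intro m hm
    have hml : ps.length ≤ m := by omega
    rw [PySem.List.pyRange_one_eq_nil (by exact_mod_cast hml),
        List.drop_eq_nil_of_le hml]
    simp [fzInnerA]
  | succ n ih =>
    intro m hm
    have hml : m < ps.length := by omega
    rw [PySem.List.pyRange_one_cons (by exact_mod_cast hml)]
    have hget : PySem.List.pyGetD ps (m : Int) 0 = ps[m] := by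
      rw [PySem.List.pyGetD_natCast, List.getD_eq_getElem ps 0 hml]
    have hcast : ((m : Int) + 1) = ((m + 1 : Nat) : Int) := by push_cast; ring
    rw [List.drop_eq_getElem_cons hml]
    simp only [fzInnerA, hget]
    by_cases hz : ps[m] = 0
    · rw [if_neg (by simp [hz]), hcast, ih (m + 1) (by omega)]
      rcases hfind : (ps.drop (m + 1)).find? (fun x => x != 0) with _ | v <;>
        simp [hz, hfind]
    · rw [if_pos hz, PySem.List.pySetD_natCast,
          List.find?_cons_of_pos (p := fun x => x != 0) (by simp [hz])]

lemma fzOuterA_spec :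
    ∀ (n : Nat) (ps : List Int) (k : Nat), ps.length - k = n → k ≤ ps.length →
      fzOuterA ps (PySem.List.pyRange (k : Int) ps.length 1) =
        ps.take k ++ fzFill 0 (ps.drop k) := by
  intro n
  induction n with
  | zero =>
    intro ps k hn _
    have hkl : k = ps.length := by omega
    rw [PySem.List.pyRange_one_eq_nil (by exact_mod_cast hkl.ge),
        List.drop_eq_nil_of_le hkl.ge]
    simp [fzOuterA, fzFill, hkl]
  | succ n ih =>
    intro ps k hn hk
    have hkl : k < ps.length := by omega
    rw [PySem.List.pyRange_one_cons (by exact_mod_cast hkl)]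
    have hget : PySem.List.pyGetD ps (k : Int) 0 = ps[k] := by
      rw [PySem.List.pyGetD_natCast, List.getD_eq_getElem ps 0 hkl]
    have hcast : ((k : Int) + 1) = ((k + 1 : Nat) : Int) := by push_cast; ring
    have hdropk : ps.drop k = ps[k] :: ps.drop (k + 1) := List.drop_eq_getElem_cons hkl
    simp only [fzOuterA, hget]
    by_cases hz : ps[k] = 0
    · rw [if_pos hz, hcast,
          fzInnerA_spec ps k hkl (ps.length - (k + 1)) (k + 1) rfl]
      rcases hfind : (ps.drop (k + 1)).find? (fun x => x != 0) with _ | v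
      · -- no non-zero to the right: state unchanged, fill value is 0
        rw [ih ps (k + 1) (by omega) (by omega), hdropk,
            List.take_add_one, fzFill]
        have h1 : fzFirst 0 (ps.drop (k + 1)) = 0 := by simp [fzFirst, hfind]
        simp [h1, hz, List.getElem?_eq_getElem hkl]
      · -- found v: state becomes ps.set k v
        have hset : ps.set k v = ps.take k ++ v :: ps.drop (k + 1) := by
          rw [List.set_eq_take_append_cons_drop, if_pos hkl]
        have hlen : (ps.set k v).length = ps.length := by simp
        have hih := ih (ps.set k v) (k + 1) (by rw [hlen]; omega) (by rw [hlen]; omega)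
        rw [hlen] at hih
        rw [hih, hset]
        have hL : (ps.take k).length = k := by rw [List.length_take]; omega
        have htk : (ps.take k ++ v :: ps.drop (k + 1)).take (k + 1)
            = ps.take k ++ [v] := by
          rw [show k + 1 = (ps.take k).length + 1 from by rw [hL], List.take_append]
          simp
        have hdk : (ps.take k ++ v :: ps.drop (k + 1)).drop (k + 1)
            = ps.drop (k + 1) := by
          rw [show k + 1 = (ps.take k).length + 1 from by rw [hL], List.drop_append]
          simp
        rw [htk, hdk, hdropk, fzFill]
        have h2 : fzFirst 0 (ps.drop (k + 1)) = v := by simp [fzFirst, hfind]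
        rw [h2, hz, if_pos rfl, List.append_assoc]
        rfl
    · have ht : ps.take (k + 1) = ps.take k ++ [ps[k]] := by
        rw [List.take_add_one]; simp [List.getElem?_eq_getElem hkl]
      rw [if_neg hz, hcast, ih ps (k + 1) (by omega) (by omega),
          ht, hdropk, fzFill, if_neg hz, List.append_assoc]
      rfl

lemma fzAltFold (xs : List Int) :
    ∀ (c : Int) (out : List Int),
      xs.reverse.foldl
        (fun (st : Int × List Int) x =>
          let carry := if x ≠ 0 then x else st.1
          (carry, st.2 ++ [if x = 0 then carry else x]))
        (c, out) = (fzFirst c xs, out ++ (fzFill c xs).reverse) := by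
  induction xs with
  | nil => intro c out; simp [fzFirst, fzFill]
  | cons x t ih =>
    intro c out
    rw [List.reverse_cons, List.foldl_append, ih c out]
    simp only [List.foldl_cons, List.foldl_nil]
    by_cases hz : x = 0
    · simp [hz, fzFirst, fzFill]
    · simp [hz, fzFirst, fzFill]

lemma portA_eq_fill (ps : List Int) : fill_zeros_with_next ps = fzFill 0 ps := by
  have h0 : ((0 : Nat) : Int) = (0 : Int) := rfl
  have := fzOuterA_spec ps.length ps 0 (by omega) (by omega)
  rw [h0] at this
  simpa [fill_zeros_with_next] using this

lemma portB_eq_fill (ps : List Int) : fill_zeros_with_next_alt ps = fzFill 0 ps := by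
  unfold fill_zeros_with_next_alt
  rw [fzAltFold ps 0 []]
  simp

-- ===== VERDICT (by name: the statement is the Claim_ definition above) =====
theorem fill_zeros_with_next_spec : Claim_equal_fill_zeros_with_next := by
  intro prices _
  unfold Spec_fill_zeros_with_next
  rw [portA_eq_fill, portB_eq_fill]
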